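-- pv_equiv track=rewrite | github.com/Pad094/AoC-2021 | p17.py | GetAllValidXCoordinates
-- ===== SOURCE A (Python) =====
-- def XCoordinateAfterTimeT(x, time):
--     timeCount   = 0
--     xCoordinate = 0
--     while timeCount < time:
--         xCoordinate += max(x - timeCount, 0)
--         timeCount +=1
--
--     return xCoordinate
--
-- def GetAllValidXCoordinates(potentialTimes, xLowerBound, xUpperBound):
--
--    validXCoordinates = []
--    for time in potentialTimes:
--         x = 0
--
--         while x <= xUpperBound:
--             if XCoordinateAfterTimeT(x, time) >= xLowerBound and  XCoordinateAfterTimeT(x, time) <= xUpperBound: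
--                 validXCoordinates.append(x)
--             x+=1
--
--
--    return validXCoordinates
-- ===== SOURCE B (Python) =====
-- def GetAllValidXCoordinates(potentialTimes, xLowerBound, xUpperBound):
--     # closed-form displacement after `time` steps instead of simulating step by step
--     def pos(x, time):
--         t = max(0, min(time, x))
--         return t * x - t * (t - 1) // 2
--     return [x
--             for time in potentialTimes
--             for x in range(xUpperBound + 1)
--             if xLowerBound <= pos(x, time) <= xUpperBound]
-- ===== Notes on version B (the rewrite author's own statement) =====
-- stated objective: faster
-- what changed: B replaces the per-x step-by-step simulation of the probe position (inner while over time) with a closed-form triangular-number formula, so each candidate x is tested in O(1).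
import Mathlib
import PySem

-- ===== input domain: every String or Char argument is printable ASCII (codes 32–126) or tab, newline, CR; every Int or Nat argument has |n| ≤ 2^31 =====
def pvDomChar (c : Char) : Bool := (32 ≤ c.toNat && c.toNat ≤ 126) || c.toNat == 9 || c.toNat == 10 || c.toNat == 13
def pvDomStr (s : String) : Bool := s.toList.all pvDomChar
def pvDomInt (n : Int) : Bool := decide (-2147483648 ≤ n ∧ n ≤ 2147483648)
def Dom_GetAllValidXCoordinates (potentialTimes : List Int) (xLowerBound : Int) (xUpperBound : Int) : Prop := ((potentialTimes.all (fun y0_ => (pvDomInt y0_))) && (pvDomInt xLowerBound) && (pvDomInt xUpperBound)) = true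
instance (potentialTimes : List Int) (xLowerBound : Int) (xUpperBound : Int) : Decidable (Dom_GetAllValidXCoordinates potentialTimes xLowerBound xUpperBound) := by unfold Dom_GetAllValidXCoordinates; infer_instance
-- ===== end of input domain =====

-- B replaces the inner step-by-step simulation of the probe position with a
-- closed-form triangular-number formula, testing each candidate x in O(1).


-- ===== PORT A =====
-- while timeCount < time: xCoordinate += max(x - timeCount, 0); timeCount += 1
def XCoordLoop (x time timeCount xCoordinate : Int) : Int :=
  if timeCount < time then
    XCoordLoop x time (timeCount + 1) (xCoordinate + max (x - timeCount) 0)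
  else xCoordinate
termination_by (time - timeCount).toNat
decreasing_by omega

def XCoordinateAfterTimeT (x time : Int) : Int := XCoordLoop x time 0 0

-- while x <= xUpperBound: if lo <= pos(x,t) <= hi: append; x += 1
def InnerLoopA (time xLowerBound xUpperBound x : Int) (acc : List Int) : List Int :=
  if x ≤ xUpperBound then
    InnerLoopA time xLowerBound xUpperBound (x + 1)
      (if XCoordinateAfterTimeT x time ≥ xLowerBound ∧ XCoordinateAfterTimeT x time ≤ xUpperBound
       then acc ++ [x] else acc)
  else acc
termination_by (xUpperBound + 1 - x).toNat
decreasing_by omega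

def GetAllValidXCoordinates (potentialTimes : List Int) (xLowerBound : Int) (xUpperBound : Int) : List Int :=
  potentialTimes.foldl (fun acc time => InnerLoopA time xLowerBound xUpperBound 0 acc) []

-- ===== PORT B =====
-- t = max(0, min(time, x)); t*x - t*(t-1)//2  (exact: t*(t-1) is even and nonneg)
def PosClosed (x time : Int) : Int :=
  let t := max 0 (min time x)
  t * x - t * (t - 1) / 2

def GetAllValidXCoordinates_alt (potentialTimes : List Int) (xLowerBound : Int) (xUpperBound : Int) : List Int :=
  potentialTimes.flatMap (fun time =>
    (PySem.List.pyRange 0 (xUpperBound + 1) 1).filter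
      (fun x => decide (xLowerBound ≤ PosClosed x time) && decide (PosClosed x time ≤ xUpperBound)))

-- ===== PRECONDITION & SPEC =====
def Spec_GetAllValidXCoordinates (potentialTimes : List Int) (xLowerBound : Int) (xUpperBound : Int) (out : List Int) : Prop := out = GetAllValidXCoordinates_alt potentialTimes xLowerBound xUpperBound
instance (potentialTimes : List Int) (xLowerBound : Int) (xUpperBound : Int) (out : List Int) : Decidable (Spec_GetAllValidXCoordinates potentialTimes xLowerBound xUpperBound out) := by unfold Spec_GetAllValidXCoordinates; infer_instance

-- ===== CLAIM (what is proved, stated in full; the proofs are below) =====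
def Claim_equal_GetAllValidXCoordinates : Prop := ∀ (potentialTimes : List Int) (xLowerBound : Int) (xUpperBound : Int), Dom_GetAllValidXCoordinates potentialTimes xLowerBound xUpperBound → Spec_GetAllValidXCoordinates potentialTimes xLowerBound xUpperBound (GetAllValidXCoordinates potentialTimes xLowerBound xUpperBound)

-- ===== LEMMAS AND PROOFS =====

-- one simulation step matches the closed form
theorem posClosed_step (X T : Int) (h : 1 ≤ T) :
    max X 0 + PosClosed (X - 1) (T - 1) = PosClosed X T := by
  simp only [PosClosed]
  by_cases hx : X ≤ 0
  · have h1 : max 0 (min (T - 1) (X - 1)) = 0 := by omega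
    have h2 : max 0 (min T X) = 0 := by omega
    rw [h1, h2]; simp; omega
  · by_cases ht : X ≤ T
    · have h1 : max 0 (min (T - 1) (X - 1)) = X - 1 := by omega
      have h2 : max 0 (min T X) = X := by omega
      rw [h1, h2]
      have e : X * (X - 1) = (X - 1) * (X - 1 - 1) + (X - 1) * 2 := by ring
      rw [e, Int.add_mul_ediv_right _ _ (by norm_num : (2:Int) ≠ 0)]
      have hm : max X 0 = X := by omega
      rw [hm]
      generalize (X - 1) * (X - 1 - 1) / 2 = q
      ring
    · have h1 : max 0 (min (T - 1) (X - 1)) = T - 1 := by omega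
      have h2 : max 0 (min T X) = T := by omega
      rw [h1, h2]
      have e : T * (T - 1) = (T - 1) * (T - 1 - 1) + (T - 1) * 2 := by ring
      rw [e, Int.add_mul_ediv_right _ _ (by norm_num : (2:Int) ≠ 0)]
      have hm : max X 0 = X := by omega
      rw [hm]
      generalize (T - 1) * (T - 1 - 1) / 2 = q
      ring

theorem xloop_eq (x time tc acc : Int) :
    XCoordLoop x time tc acc = acc + PosClosed (x - tc) (time - tc) := by
  generalize hn : (time - tc).toNat = n
  induction n generalizing tc acc with
  | zero =>
    rw [XCoordLoop, if_neg (by omega : ¬ tc < time)]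
    have h0 : max 0 (min (time - tc) (x - tc)) = 0 := by omega
    simp only [PosClosed]
    rw [h0]; simp
  | succ n ih =>
    have h : tc < time := by omega
    rw [XCoordLoop, if_pos h, ih (tc + 1) _ (by omega)]
    have e1 : x - (tc + 1) = (x - tc) - 1 := by ring
    have e2 : time - (tc + 1) = (time - tc) - 1 := by ring
    rw [e1, e2]
    have := posClosed_step (x - tc) (time - tc) (by omega)
    linarith

theorem xcoord_eq (x time : Int) : XCoordinateAfterTimeT x time = PosClosed x time := by
  unfold XCoordinateAfterTimeT
  rw [xloop_eq]
  simp

theorem inner_eq (time L U x : Int) (acc : List Int) :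
    InnerLoopA time L U x acc =
      acc ++ (PySem.List.pyRange x (U + 1) 1).filter
        (fun y => decide (L ≤ PosClosed y time) && decide (PosClosed y time ≤ U)) := by
  generalize hn : (U + 1 - x).toNat = n
  induction n generalizing x acc with
  | zero =>
    rw [InnerLoopA.eq_def, if_neg (by omega : ¬ x ≤ U),
        PySem.List.pyRange_one_eq_nil (by omega : U + 1 ≤ x)]
    simp
  | succ n ih =>
    have h : x ≤ U := by omega
    rw [InnerLoopA.eq_def, if_pos h, ih (x + 1) _ (by omega),
        PySem.List.pyRange_one_cons (by omega : x < U + 1)]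
    rw [List.filter_cons]
    by_cases hc : L ≤ PosClosed x time ∧ PosClosed x time ≤ U
    · rw [if_pos (by simp [ge_iff_le, xcoord_eq, hc.1, hc.2])]
      simp [hc.1, hc.2]
    · rw [if_neg (by simp only [ge_iff_le, xcoord_eq]; exact hc)]
      have : (decide (L ≤ PosClosed x time) && decide (PosClosed x time ≤ U)) = false := by
        rcases Decidable.not_and_iff_not_or_not.mp hc with h' | h' <;> simp [h']
      rw [this]
      simp

theorem outer_eq (ts : List Int) (L U : Int) (acc : List Int) :
    ts.foldl (fun acc time => InnerLoopA time L U 0 acc) acc =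
      acc ++ ts.flatMap (fun time =>
        (PySem.List.pyRange 0 (U + 1) 1).filter
          (fun x => decide (L ≤ PosClosed x time) && decide (PosClosed x time ≤ U))) := by
  induction ts generalizing acc with
  | nil => simp
  | cons t ts ih =>
    rw [List.foldl_cons, inner_eq, ih, List.flatMap_cons, List.append_assoc]

-- ===== VERDICT (by name: the statement is the Claim_ definition above) =====
theorem GetAllValidXCoordinates_spec : Claim_equal_GetAllValidXCoordinates := by
  intro ts L U _
  unfold Spec_GetAllValidXCoordinates GetAllValidXCoordinates GetAllValidXCoordinates_alt
  rw [outer_eq]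
  simp
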